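-- pv_equiv track=rewrite | github.com/narpfel/adventofcode | 2017/03/solution.py | iter_layer_positions
-- ===== SOURCE A (Python) =====
-- def iter_layer_positions(layer):
--     for y in range(-layer + 1, layer + 1):
--         yield (layer, y)
--     for x in reversed(range(-layer, layer)):
--         yield (x, layer)
--     for y in reversed(range(-layer, layer)):
--         yield (-layer, y)
--     for x in range(-layer + 1, layer + 1):
--         yield (x, -layer)
-- ===== SOURCE B (Python) =====
-- def iter_layer_positions(layer):
--     x, y = layer, -layer + 1
--     dx, dy = 0, 1
--     for _ in range(8 * layer):
--         yield (x, y)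
--         x, y = x + dx, y + dy
--         if abs(x) == layer and abs(y) == layer:
--             dx, dy = -dy, dx
-- ===== Notes on version B (the rewrite author's own statement) =====
-- stated objective: alternative
-- what changed: Replaced the four separate edge loops by a single continuous perimeter walk with one position/direction state that rotates the direction whenever it steps onto a corner.
import Mathlib
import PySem

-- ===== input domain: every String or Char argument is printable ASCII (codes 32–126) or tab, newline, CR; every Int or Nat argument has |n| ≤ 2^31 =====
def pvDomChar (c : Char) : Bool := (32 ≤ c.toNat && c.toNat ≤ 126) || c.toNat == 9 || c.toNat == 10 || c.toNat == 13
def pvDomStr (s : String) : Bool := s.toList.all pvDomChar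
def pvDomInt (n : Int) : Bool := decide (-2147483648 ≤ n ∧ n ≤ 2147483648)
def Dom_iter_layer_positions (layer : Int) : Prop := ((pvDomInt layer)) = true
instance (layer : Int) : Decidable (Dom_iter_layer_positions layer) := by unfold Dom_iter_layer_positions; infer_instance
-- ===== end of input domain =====

-- B replaces A's four separate edge loops by one continuous perimeter walk with a single
-- position/direction state that rotates at corners; same cost, a different decomposition.

-- ===== PORT A =====
-- the generator's yields collected in order: four edge loops over ranges
def iter_layer_positions (layer : Int) : List (Int × Int) :=
  ((PySem.List.pyRange (-layer + 1) (layer + 1) 1).map (fun y => (layer, y)))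
  ++ ((PySem.List.pyRange (-layer) layer 1).reverse.map (fun x => (x, layer)))
  ++ ((PySem.List.pyRange (-layer) layer 1).reverse.map (fun y => (-layer, y)))
  ++ ((PySem.List.pyRange (-layer + 1) (layer + 1) 1).map (fun x => (x, -layer)))

-- ===== PORT B =====
-- the walk loop of Source B: state (x, y, dx, dy), one yield-and-step per fuel unit
def pvWalk (layer : Int) : Nat → Int → Int → Int → Int → List (Int × Int)
  | 0, _, _, _, _ => []
  | n + 1, x, y, dx, dy =>
    let x' := x + dx
    let y' := y + dy
    (x, y) ::
      (if |x'| = layer ∧ |y'| = layer then pvWalk layer n x' y' (-dy) dx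
       else pvWalk layer n x' y' dx dy)

def iter_layer_positions_alt (layer : Int) : List (Int × Int) :=
  pvWalk layer (8 * layer).toNat layer (-layer + 1) 0 1

-- ===== PRECONDITION & SPEC =====
def Spec_iter_layer_positions (layer : Int) (out : List (Int × Int)) : Prop := out = iter_layer_positions_alt layer
instance (layer : Int) (out : List (Int × Int)) : Decidable (Spec_iter_layer_positions layer out) := by unfold Spec_iter_layer_positions; infer_instance

-- ===== CLAIM (what is proved, stated in full; the proofs are below) =====
def Claim_equal_iter_layer_positions : Prop := ∀ (layer : Int), Dom_iter_layer_positions layer → Spec_iter_layer_positions layer (iter_layer_positions layer)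

-- ===== LEMMAS AND PROOFS =====
lemma pvWalk_succ (layer : Int) (n : Nat) (x y dx dy : Int) :
    pvWalk layer (n+1) x y dx dy =
      (x, y) :: (if |x+dx| = layer ∧ |y+dy| = layer then pvWalk layer n (x+dx) (y+dy) (-dy) dx
                 else pvWalk layer n (x+dx) (y+dy) dx dy) := rfl

lemma pvWalk_one (layer x y dx dy : Int) :
    pvWalk layer 1 x y dx dy = [(x, y)] := by
  rw [show (1:Nat) = 0+1 from rfl, pvWalk_succ]; split <;> rfl

lemma pvMapRangeCongr {α : Type} (f g : Nat → α) (m : Nat) (h : ∀ k, f k = g k) :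
    (List.range m).map f = (List.range m).map g :=
  List.map_eq_map_iff.mpr fun a _ => h a

lemma pvConsMap {α : Type} (h : Nat → α) (m : Nat) :
    (List.range (m+1)).map h = h 0 :: (List.range m).map (fun k => h (k+1)) := by
  rw [List.range_succ_eq_map, List.map_cons, List.map_map]; rfl

lemma pvSnocCons {α : Type} (h : Nat → α) (m : Nat) :
    h 0 :: (List.range m).map (fun k => h (k+1)) = (List.range m).map h ++ [h m] := by
  rw [← pvConsMap, List.range_succ, List.map_append]; rfl

lemma pvPhaseUp (L : Int) (hL : 1 ≤ L) :
    ∀ (k m : Nat) (y : Int), -L < y → y + (k:Int) + 1 = L →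
      pvWalk L (k+1+m) L y 0 1
        = (List.range (k+1)).map (fun i : Nat => (L, y + (i:Int))) ++ pvWalk L m L L (-1) 0 := by
  intro k
  induction k with
  | zero =>
    intro m y hy hyk
    simp only [Nat.cast_zero, add_zero] at hyk
    rw [show 0+1+m = m+1 by omega, pvWalk_succ]
    rw [if_pos ⟨by simp [abs_of_nonneg (by omega : (0:Int) ≤ L)],
                 by rw [show y+1 = L by omega]; exact abs_of_nonneg (by omega)⟩]
    simp [show y+1 = L by omega]
  | succ k ih =>
    intro m y hy hyk
    push_cast at hyk
    rw [show k+1+1+m = (k+1+m)+1 by omega, pvWalk_succ]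
    rw [if_neg (by
      rintro ⟨-, h2⟩
      rcases (abs_eq (by omega : (0:Int) ≤ L)).mp h2 with h3 | h3 <;> omega)]
    simp only [add_zero]
    rw [ih m (y+1) (by omega) (by omega)]
    rw [pvConsMap (fun i : Nat => (L, y + (i:Int))) (k+1)]
    simp only [Nat.cast_zero, add_zero, List.cons_append]
    congr 2
    exact pvMapRangeCongr _ _ _ (fun i => by push_cast; ring_nf)

lemma pvPhaseLeft (L : Int) (hL : 1 ≤ L) :
    ∀ (k m : Nat) (x : Int), x ≤ L → x - (k:Int) - 1 = -L →
      pvWalk L (k+1+m) x L (-1) 0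
        = (List.range (k+1)).map (fun i : Nat => (x - (i:Int), L)) ++ pvWalk L m (-L) L 0 (-1) := by
  intro k
  induction k with
  | zero =>
    intro m x hx hxk
    simp only [Nat.cast_zero, sub_zero] at hxk
    rw [show 0+1+m = m+1 by omega, pvWalk_succ]
    rw [if_pos ⟨by rw [show x + -1 = -L by omega]; simp [abs_of_nonneg (by omega : (0:Int) ≤ L)],
                 by simp [abs_of_nonneg (by omega : (0:Int) ≤ L)]⟩]
    simp [show x + -1 = -L by omega]
  | succ k ih =>
    intro m x hx hxk
    push_cast at hxk
    rw [show k+1+1+m = (k+1+m)+1 by omega, pvWalk_succ]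
    rw [if_neg (by
      rintro ⟨h2, -⟩
      rcases (abs_eq (by omega : (0:Int) ≤ L)).mp h2 with h3 | h3 <;> omega)]
    simp only [add_zero, ← sub_eq_add_neg]
    rw [ih m (x-1) (by omega) (by omega)]
    rw [pvConsMap (fun i : Nat => (x - (i:Int), L)) (k+1)]
    simp only [Nat.cast_zero, sub_zero, List.cons_append]
    congr 2
    exact pvMapRangeCongr _ _ _ (fun i => by push_cast; norm_num; ring_nf)

lemma pvPhaseDown (L : Int) (hL : 1 ≤ L) :
    ∀ (k m : Nat) (y : Int), y ≤ L → y - (k:Int) - 1 = -L →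
      pvWalk L (k+1+m) (-L) y 0 (-1)
        = (List.range (k+1)).map (fun i : Nat => (-L, y - (i:Int))) ++ pvWalk L m (-L) (-L) 1 0 := by
  intro k
  induction k with
  | zero =>
    intro m y hy hyk
    simp only [Nat.cast_zero, sub_zero] at hyk
    rw [show 0+1+m = m+1 by omega, pvWalk_succ]
    rw [if_pos ⟨by simp [abs_of_nonneg (by omega : (0:Int) ≤ L)],
                 by rw [show y + -1 = -L by omega]; simp [abs_of_nonneg (by omega : (0:Int) ≤ L)]⟩]
    simp [show y + -1 = -L by omega]
  | succ k ih =>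
    intro m y hy hyk
    push_cast at hyk
    rw [show k+1+1+m = (k+1+m)+1 by omega, pvWalk_succ]
    rw [if_neg (by
      rintro ⟨-, h2⟩
      rcases (abs_eq (by omega : (0:Int) ≤ L)).mp h2 with h3 | h3 <;> omega)]
    simp only [add_zero, ← sub_eq_add_neg]
    rw [ih m (y-1) (by omega) (by omega)]
    rw [pvConsMap (fun i : Nat => (-L, y - (i:Int))) (k+1)]
    simp only [Nat.cast_zero, sub_zero, List.cons_append]
    congr 2
    exact pvMapRangeCongr _ _ _ (fun i => by push_cast; norm_num; ring_nf)

lemma pvPhaseRight (L : Int) (hL : 1 ≤ L) :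
    ∀ (k m : Nat) (x : Int), -L ≤ x → x + (k:Int) + 1 = L →
      pvWalk L (k+1+m) x (-L) 1 0
        = (List.range (k+1)).map (fun i : Nat => (x + (i:Int), -L)) ++ pvWalk L m L (-L) 0 1 := by
  intro k
  induction k with
  | zero =>
    intro m x hx hxk
    simp only [Nat.cast_zero, add_zero] at hxk
    rw [show 0+1+m = m+1 by omega, pvWalk_succ]
    rw [if_pos ⟨by rw [show x + 1 = L by omega]; exact abs_of_nonneg (by omega),
                 by simp [abs_of_nonneg (by omega : (0:Int) ≤ L)]⟩]
    simp [show x + 1 = L by omega]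
  | succ k ih =>
    intro m x hx hxk
    push_cast at hxk
    rw [show k+1+1+m = (k+1+m)+1 by omega, pvWalk_succ]
    rw [if_neg (by
      rintro ⟨h2, -⟩
      rcases (abs_eq (by omega : (0:Int) ≤ L)).mp h2 with h3 | h3 <;> omega)]
    simp only [add_zero]
    rw [ih m (x+1) (by omega) (by omega)]
    rw [pvConsMap (fun i : Nat => (x + (i:Int), -L)) (k+1)]
    simp only [Nat.cast_zero, add_zero, List.cons_append]
    congr 2
    exact pvMapRangeCongr _ _ _ (fun i => by push_cast; ring_nf)

theorem pvMain (L : Int) : iter_layer_positions L = iter_layer_positions_alt L := by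
  by_cases hL : L ≤ 0
  · unfold iter_layer_positions iter_layer_positions_alt
    rw [PySem.List.pyRange_one_eq_nil (by omega), PySem.List.pyRange_one_eq_nil (by omega),
        show (8*L).toNat = 0 by omega]
    simp [pvWalk]
  · push Not at hL
    obtain ⟨m, hm⟩ : ∃ m : Nat, L = (m:Int) + 1 := ⟨(L-1).toNat, by omega⟩
    have hB : iter_layer_positions_alt L
        = (List.range (2*m+1)).map (fun i : Nat => (L, -L+1 + (i:Int)))
          ++ ((List.range (2*m+2)).map (fun i : Nat => (L - (i:Int), L))
          ++ ((List.range (2*m+2)).map (fun i : Nat => (-L, L - (i:Int)))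
          ++ ((List.range (2*m+2)).map (fun i : Nat => (-L + (i:Int), -L))
          ++ [(L, -L)]))) := by
      unfold iter_layer_positions_alt
      rw [show (8*L).toNat = (2*m)+1+(6*m+7) by omega]
      rw [pvPhaseUp L (by omega) (2*m) (6*m+7) (-L+1) (by omega) (by push_cast; omega)]
      rw [show 6*m+7 = (2*m+1)+1+(4*m+5) by omega]
      rw [pvPhaseLeft L (by omega) (2*m+1) (4*m+5) L (by omega) (by push_cast; omega)]
      rw [show 4*m+5 = (2*m+1)+1+(2*m+3) by omega]
      rw [pvPhaseDown L (by omega) (2*m+1) (2*m+3) L (by omega) (by push_cast; omega)]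
      rw [show 2*m+3 = (2*m+1)+1+1 by omega]
      rw [pvPhaseRight L (by omega) (2*m+1) 1 (-L) (by omega) (by push_cast; omega)]
      rw [pvWalk_one]
    rw [hB]
    unfold iter_layer_positions
    have h2 : (PySem.List.pyRange (-L) L 1).reverse = PySem.List.pyRange (L-1) (-L-1) (-1) := by
      rw [PySem.List.pyRange_neg_one_eq_reverse]; norm_num
    rw [PySem.List.pyRange_one (-L+1) (L+1), h2, PySem.List.pyRange_neg_one]
    rw [show ((L+1)-(-L+1)).toNat = 2*m+2 by omega, show ((L-1)-(-L-1)).toNat = 2*m+2 by omega]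
    simp only [List.map_map]
    have e1 : List.map ((fun y => (L, y)) ∘ fun k : Nat => -L + 1 + (k:Int)) (List.range (2*m+2))
        = List.map (fun i : Nat => (L, -L+1+(i:Int))) (List.range (2*m+1)) ++ [((L, L) : Int × Int)] := by
      rw [show 2*m+2 = (2*m+1)+1 by omega, List.range_succ, List.map_append]
      congr 1
      simp only [List.map_cons, List.map_nil, Function.comp_apply, List.cons.injEq, and_true,
        Prod.mk.injEq, true_and]
      push_cast; omega
    have e2 : ((L, L) : Int × Int) :: List.map ((fun x => (x, L)) ∘ fun k : Nat => L - 1 - (k:Int)) (List.range (2*m+2))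
        = List.map (fun i : Nat => (L - (i:Int), L)) (List.range (2*m+2)) ++ [((-L, L) : Int × Int)] := by
      have h := pvSnocCons (fun k : Nat => (L - (k:Int), L)) (2*m+2)
      rw [show ((-L, L) : Int × Int) = (L - ((2*m+2 : Nat):Int), L) by
        simp only [Prod.mk.injEq, and_true]; push_cast; omega]
      rw [← h]
      congr 1
      · norm_num
      exact pvMapRangeCongr _ _ _ (fun k => by
        simp only [Function.comp_apply, Prod.mk.injEq, and_true]; push_cast; ring)
    have e3 : ((-L, L) : Int × Int) :: List.map ((fun y => (-L, y)) ∘ fun k : Nat => L - 1 - (k:Int)) (List.range (2*m+2))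
        = List.map (fun i : Nat => (-L, L - (i:Int))) (List.range (2*m+2)) ++ [((-L, -L) : Int × Int)] := by
      have h := pvSnocCons (fun k : Nat => (-L, L - (k:Int))) (2*m+2)
      rw [show ((-L, -L) : Int × Int) = (-L, L - ((2*m+2 : Nat):Int)) by
        simp only [Prod.mk.injEq, true_and]; push_cast; omega]
      rw [← h]
      congr 1
      · norm_num
      exact pvMapRangeCongr _ _ _ (fun k => by
        simp only [Function.comp_apply, Prod.mk.injEq, true_and]; push_cast; ring)
    have e4 : ((-L, -L) : Int × Int) :: List.map ((fun x => (x, -L)) ∘ fun k : Nat => -L + 1 + (k:Int)) (List.range (2*m+2))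
        = List.map (fun i : Nat => (-L + (i:Int), -L)) (List.range (2*m+2)) ++ [((L, -L) : Int × Int)] := by
      have h := pvSnocCons (fun k : Nat => (-L + (k:Int), -L)) (2*m+2)
      rw [show ((L, -L) : Int × Int) = (-L + ((2*m+2 : Nat):Int), -L) by
        simp only [Prod.mk.injEq, and_true]; push_cast; omega]
      rw [← h]
      congr 1
      · norm_num
      exact pvMapRangeCongr _ _ _ (fun k => by
        simp only [Function.comp_apply, Prod.mk.injEq, and_true]; push_cast; ring)
    rw [e1]
    simp only [List.append_assoc, List.singleton_append]
    rw [e2]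
    simp only [List.append_assoc, List.singleton_append]
    rw [← List.cons_append, e3]
    simp only [List.append_assoc, List.singleton_append]
    rw [e4]

-- ===== VERDICT (by name: the statement is the Claim_ definition above) =====
theorem iter_layer_positions_spec : Claim_equal_iter_layer_positions := by
  intro layer _
  unfold Spec_iter_layer_positions
  exact pvMain layer
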